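-- pv_equiv track=rewrite | github.com/rishabhcodespace/co_project | CO Project evaluation framework/SimpleAssembler/Assembler.py | jal
-- ===== SOURCE A (Python) =====
-- def binary_convertor(b,n):
--     nbits = n.bit_length() + 1
--
--     binary=f"{n & ((1 << nbits) - 1):0{nbits}b}"
--     if n>=0:
--         binary=(b-nbits)*'0'+binary
--         return binary
--     else:
--         binary=(b-nbits)*'1'+binary
--         return binary
--
-- registers={'zero':'00000','ra':'00001','sp':'00010','gp':'00011','tp':'00100',
--            't0':'00101','t1':'00110','t2':'00111','s0':'01000','s1':'01001',
--            'a0':'01010','a1':'01011','a2':'01100','a3':'01101','a4':'01110',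
--            'a5':'01111','a6':'10000','a7':'10001','s2':'10010','s3':'10011',
--            's4':'10100','s5':'10101','s6':'10110','s7':'10111','s8':'11000',
--            's9':'11001','s10':'11010','s11':'11011','t3':'11100','t4':'11101',
--            't5':'11110','t6':'11111'}
--
-- def jal(lst):
-- 	new_list=[]
-- 	imm_str=binary_convertor(20,int(lst[2]))
-- 	new_list.append(imm_str[-20]+imm_str[-11:-1]+imm_str[-11]+imm_str[-20:-12])
-- 	new_list.append(registers[lst[1]])
-- 	new_list.append('1101111')
-- 	str=""
-- 	for i in new_list:
-- 		str+=i
-- 	return str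
-- ===== SOURCE B (Python) =====
-- REGNUM = {'zero': 0, 'ra': 1, 'sp': 2, 'gp': 3, 'tp': 4, 't0': 5, 't1': 6, 't2': 7,
--           's0': 8, 's1': 9, 'a0': 10, 'a1': 11, 'a2': 12, 'a3': 13, 'a4': 14, 'a5': 15,
--           'a6': 16, 'a7': 17, 's2': 18, 's3': 19, 's4': 20, 's5': 21, 's6': 22, 's7': 23,
--           's8': 24, 's9': 25, 's10': 26, 's11': 27, 't3': 28, 't4': 29, 't5': 30, 't6': 31}
--
-- # J-type bit layout, MSB first: imm[19], imm[10:1], imm[10] (sic - as in the original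
-- # encoder), imm[19:12]; then rd (5 bits) and the JAL opcode (7 bits).
-- JAL_BIT_ORDER = [19] + list(range(10, 0, -1)) + [10] + list(range(19, 11, -1))
--
--
-- def jal(lst):
--     rd = REGNUM[lst[1]]
--     imm = int(lst[2])
--     word = 0
--     for k in JAL_BIT_ORDER:
--         word = word * 2 + imm // 2 ** k % 2
--     word = (word * 32 + rd) * 128 + 0b1101111
--     return format(word, '032b')
-- ===== Notes on version B (the rewrite author's own statement) =====
-- stated objective: alternative
-- what changed: Replaces two's-complement string construction plus end-relative slicing/reassembly with integer bit arithmetic: each immediate bit is extracted as imm // 2**k % 2 following the (original's) J-type bit order, shift-accumulated into a 32-bit word together with the register number and opcode, and formatted once as a 32-digit binary string.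
import Mathlib
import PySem

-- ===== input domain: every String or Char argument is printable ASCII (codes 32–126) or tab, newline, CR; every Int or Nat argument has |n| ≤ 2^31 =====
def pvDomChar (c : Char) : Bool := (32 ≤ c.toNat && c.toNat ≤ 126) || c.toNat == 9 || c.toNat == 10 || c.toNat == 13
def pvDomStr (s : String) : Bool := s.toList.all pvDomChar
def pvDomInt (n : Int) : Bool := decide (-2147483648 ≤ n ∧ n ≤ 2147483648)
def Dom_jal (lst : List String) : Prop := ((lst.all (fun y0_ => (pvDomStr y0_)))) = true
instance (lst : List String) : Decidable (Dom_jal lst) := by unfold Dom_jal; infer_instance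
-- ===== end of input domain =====

-- B re-encodes the JAL instruction by integer bit arithmetic (shift-accumulating the
-- immediate bits, register number and opcode into one 32-bit word) instead of A's
-- two's-complement string building and end-relative slicing; equality of the returned
-- 32-character string is proved on Pre_jal (the inputs where A raises no exception).

-- ===== PORT A =====

-- the module-level `registers` dict (insertion order of the Python literal)
def registers : PySem.Dict String String := PySem.Dict.mk
  [("zero","00000"),("ra","00001"),("sp","00010"),("gp","00011"),("tp","00100"),
   ("t0","00101"),("t1","00110"),("t2","00111"),("s0","01000"),("s1","01001"),
   ("a0","01010"),("a1","01011"),("a2","01100"),("a3","01101"),("a4","01110"),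
   ("a5","01111"),("a6","10000"),("a7","10001"),("s2","10010"),("s3","10011"),
   ("s4","10100"),("s5","10101"),("s6","10110"),("s7","10111"),("s8","11000"),
   ("s9","11001"),("s10","11010"),("s11","11011"),("t3","11100"),("t4","11101"),
   ("t5","11110"),("t6","11111")]

-- f"{m:0{w}b}" for m ≥ 0 (the only case A reaches: the mask makes the value nonnegative):
-- binary digits (PySem.Int.toBinChars = format(n, 'b')) left-padded with '0' to width w
def padBin (w : Nat) (digits : List Char) : List Char :=
  List.replicate (w - digits.length) '0' ++ digits

-- binary_convertor(b, n), working on the string's character list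
def binary_convertor (b n : Int) : List Char :=
  let nbits : Nat := PySem.Int.bitLength n + 1
  let binary := padBin nbits (PySem.Int.toBinChars (PySem.Int.band n ((1 : Int) <<< nbits - 1)))
  if 0 ≤ n then List.replicate ((b - (nbits : Int)).toNat) '0' ++ binary
  else List.replicate ((b - (nbits : Int)).toNat) '1' ++ binary

-- strings are handled as their character lists (PySem.Chars convention); the
-- single-character accesses imm_str[-20] / imm_str[-11] use pyGetD: they are always
-- in range because len(imm_str) = max(20, nbits) ≥ 20 (so Python never raises there)
def jal (lst : List String) : String :=
  match PySem.List.pyGet? lst 2 with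
  | none => ""                                   -- IndexError: excluded by Pre_jal
  | some s2 =>
    match PySem.Int.ofStr? s2 with
    | none => ""                                 -- ValueError: excluded by Pre_jal
    | some n =>
      let imm_str := binary_convertor 20 n
      let field :=
        [PySem.List.pyGetD imm_str (-20) ' ']
          ++ PySem.List.slice imm_str (some (-11)) (some (-1))
          ++ [PySem.List.pyGetD imm_str (-11) ' ']
          ++ PySem.List.slice imm_str (some (-20)) (some (-12))
      match PySem.List.pyGet? lst 1 with
      | none => ""                               -- IndexError: excluded by Pre_jal
      | some s1 =>
        match PySem.Dict.get? registers s1 with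
        | none => ""                             -- KeyError: excluded by Pre_jal
        | some reg =>
          let new_list := [field, reg.toList, "1101111".toList]
          String.ofList (new_list.foldl (fun acc i => acc ++ i) [])

-- ===== PORT B =====

-- B's own register-number table
def regnum : PySem.Dict String Int := PySem.Dict.mk
  [("zero",0),("ra",1),("sp",2),("gp",3),("tp",4),
   ("t0",5),("t1",6),("t2",7),("s0",8),("s1",9),
   ("a0",10),("a1",11),("a2",12),("a3",13),("a4",14),
   ("a5",15),("a6",16),("a7",17),("s2",18),("s3",19),
   ("s4",20),("s5",21),("s6",22),("s7",23),("s8",24),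
   ("s9",25),("s10",26),("s11",27),("t3",28),("t4",29),
   ("t5",30),("t6",31)]

-- JAL_BIT_ORDER = [19] + list(range(10, 0, -1)) + [10] + list(range(19, 11, -1))
def jalBitOrder : List Nat := [19,10,9,8,7,6,5,4,3,2,1,10,19,18,17,16,15,14,13,12]

-- imm // 2 ** k % 2, the k-th two's-complement bit of imm (Python floor division/mod)
def bBit (imm : Int) (k : Nat) : Int :=
  PySem.Int.mod (PySem.Int.floordiv imm ((2 : Int) ^ k)) 2

def jal_alt (lst : List String) : String :=
  match PySem.List.pyGet? lst 1 with
  | none => ""                                   -- IndexError: excluded by Pre_jal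
  | some s1 =>
  match PySem.Dict.get? regnum s1 with
  | none => ""                                   -- KeyError: excluded by Pre_jal
  | some rd =>
  match PySem.List.pyGet? lst 2 with
  | none => ""                                   -- IndexError: excluded by Pre_jal
  | some s2 =>
  match PySem.Int.ofStr? s2 with
  | none => ""                                   -- ValueError: excluded by Pre_jal
  | some imm =>
    let word := jalBitOrder.foldl (fun w k => w * 2 + bBit imm k) 0
    let word := (word * 32 + rd) * 128 + 111     -- 0b1101111 = 111
    -- format(word, '032b'); word is always nonnegative here
    String.ofList (padBin 32 (PySem.Int.toBinChars word))

-- ===== PRECONDITION & SPEC =====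

-- Pre_jal: exactly the inputs where the Python A returns normally — the list has an
-- element at index 1 and 2, int(lst[2]) parses, and lst[1] is a register name
def Pre_jal (lst : List String) : Prop :=
  2 < lst.length ∧ (PySem.Int.ofStr? (lst.getD 2 "")).isSome = true ∧
    (PySem.Dict.get? registers (lst.getD 1 "")).isSome = true
instance (lst : List String) : Decidable (Pre_jal lst) := by unfold Pre_jal; infer_instance

def pvWitness_jal : List String := ["jal", "ra", "-4"]

def Spec_jal (lst : List String) (out : String) : Prop := out = jal_alt lst
instance (lst : List String) (out : String) : Decidable (Spec_jal lst out) := by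
  unfold Spec_jal; infer_instance

-- ===== CLAIM (what is proved, stated in full; the proofs are below) =====
def Claim_equal_jal : Prop := ∀ (lst : List String), Dom_jal lst → Pre_jal lst → Spec_jal lst (jal lst)

-- ===== LEMMAS AND PROOFS =====

-- the low w two's-complement bits of m, most significant first
def binW : Nat → Nat → List Char
  | 0, _ => []
  | w+1, m => binW w (m / 2) ++ [Nat.digitChar (m % 2)]

-- the k-th two's-complement bit of n, as a character
def cchar (n : Int) (k : Nat) : Char := Nat.digitChar ((n / 2 ^ k % 2).toNat)

-- Nat.toDigits 2, written as structural recursion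
def bdigits (m : Nat) : List Char :=
  if m < 2 then [Nat.digitChar m] else bdigits (m / 2) ++ [Nat.digitChar (m % 2)]
termination_by m
decreasing_by omega

theorem binW_zero (w : Nat) : binW w 0 = List.replicate w '0' := by
  induction w with
  | zero => rfl
  | succ w ih =>
    rw [binW, ih, show Nat.digitChar (0 % 2) = '0' from rfl, ← List.replicate_succ']

theorem binW_eq_map (w : Nat) : ∀ m, binW w m =
    ((List.range w).reverse).map (fun k => Nat.digitChar (m / 2 ^ k % 2)) := by
  induction w with
  | zero => intro m; rfl
  | succ w ih =>
    intro m
    rw [binW, ih (m / 2), List.range_succ_eq_map]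
    simp [List.map_map, Function.comp_def, Nat.div_div_eq_div_mul, pow_succ, Nat.mul_comm]

theorem toDigitsCore_eq : ∀ (f n : Nat) (acc : List Char), 0 < f → n < 2 ^ f →
    Nat.toDigitsCore 2 f n acc = bdigits n ++ acc := by
  intro f
  induction f with
  | zero => omega
  | succ f ih =>
    intro n acc _ hlt
    rw [Nat.toDigitsCore]
    by_cases h2 : n / 2 = 0
    · have hn2 : n < 2 := by omega
      rw [bdigits]
      simp [h2, hn2, Nat.mod_eq_of_lt hn2]
    · have hn2 : ¬ n < 2 := by omega
      have hf : 0 < f := by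
        by_contra hf
        have : f = 0 := by omega
        subst this; omega
      simp only [h2, if_false]
      rw [ih (n / 2) _ hf (by omega)]
      conv_rhs => rw [bdigits]
      simp [hn2]

theorem toDigits_eq_bdigits (m : Nat) : Nat.toDigits 2 m = bdigits m := by
  have := toDigitsCore_eq (m + 1) m [] (by omega)
    (lt_of_lt_of_le Nat.lt_two_pow_self (Nat.pow_le_pow_right (by omega) (by omega)))
  simpa [Nat.toDigits] using this

theorem padBin_bdigits : ∀ (w m : Nat), 0 < w → m < 2 ^ w →
    padBin w (bdigits m) = binW w m := by
  intro w
  induction w with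
  | zero => omega
  | succ w ih =>
    intro m _ hm
    by_cases h2 : m < 2
    · rw [bdigits]
      simp only [h2, if_true]
      rw [binW, Nat.div_eq_of_lt h2, Nat.mod_eq_of_lt h2, binW_zero, padBin]
      simp
    · have hw : 0 < w := by
        by_contra hw
        have : w = 0 := by omega
        subst this; omega
      rw [bdigits]
      simp only [h2, if_false]
      rw [binW, ← ih (m / 2) hw (by omega), padBin, padBin]
      simp [Nat.succ_sub_succ, List.append_assoc]

-- Python's n & ((1 << w) - 1) is n mod 2^w
theorem band_two_pow_sub_one (n : Int) (w : Nat) :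
    PySem.Int.band n ((2 : Int) ^ w - 1) = n % 2 ^ w := by
  have hb : (0 : Int) ≤ 2 ^ w - 1 := by
    have : (0 : Int) < 2 ^ w := by positivity
    omega
  have hcast : ((2 : Int) ^ w - 1).toNat = 2 ^ w - 1 := by
    have : ((2 ^ w - 1 : Nat) : Int) = 2 ^ w - 1 := by
      have : (1 : Nat) ≤ 2 ^ w := Nat.one_le_two_pow
      push_cast [this]; ring
    omega
  by_cases hn : 0 ≤ n
  · rw [PySem.Int.band_of_nonneg hn hb, hcast, Nat.and_two_pow_sub_one_eq_mod]
    have h1 : ((n.toNat : Int)) = n := Int.toNat_of_nonneg hn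
    have h2 : ((n.toNat % 2 ^ w : Nat) : Int) = (n.toNat : Int) % ((2 ^ w : Nat) : Int) := by
      push_cast
      ring
    rw [h2, h1]
    push_cast
    ring_nf
  · rw [PySem.Int.band]
    simp only [hn, if_false, hb, if_true]
    set m : Nat := (-n - 1).toNat with hm
    have hmc : ((m : Int)) = -n - 1 := Int.toNat_of_nonneg (by omega)
    have hP : (0 : Int) < 2 ^ w := by positivity
    rw [hcast, Nat.and_comm, Nat.and_two_pow_sub_one_eq_mod]
    have hr : m % 2 ^ w < 2 ^ w := Nat.mod_lt _ (by positivity)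
    have hq : ((m : Int)) = 2 ^ w * ((m / 2 ^ w : Nat) : Int) + ((m % 2 ^ w : Nat) : Int) := by
      exact_mod_cast (Nat.div_add_mod m (2 ^ w)).symm
    have hsc : ((2 ^ w - 1 - m % 2 ^ w : Nat) : Int) = 2 ^ w - 1 - ((m % 2 ^ w : Nat) : Int) := by
      have h1 : m % 2 ^ w ≤ 2 ^ w - 1 := by omega
      have h2 : (1 : Nat) ≤ 2 ^ w := Nat.one_le_two_pow
      push_cast [h1, h2]; ring
    rw [hsc]
    have key : n = (2 ^ w - 1 - ((m % 2 ^ w : Nat) : Int)) +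
        2 ^ w * (-((m / 2 ^ w : Nat) : Int) - 1) := by
      have hn' : n = -(m : Int) - 1 := by omega
      rw [hn', hq]; ring
    conv_rhs => rw [key]
    rw [Int.add_mul_emod_self_left]
    refine (Int.emod_eq_of_lt ?_ ?_).symm
    · have : (0 : Int) ≤ ((m % 2 ^ w : Nat) : Int) := by positivity
      omega
    · have : ((m % 2 ^ w : Nat) : Int) ≥ 0 := by positivity
      omega

-- low bits of n and of n mod 2^w agree
theorem low_bit_eq (n : Int) (w k : Nat) (hk : k < w) :
    (n % 2 ^ w) / 2 ^ k % 2 = n / 2 ^ k % 2 := by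
  have hk0 : ((2 : Int) ^ k) ≠ 0 := by positivity
  have hsplit : n = n % 2 ^ w + 2 ^ k * (2 ^ (w - k) * (n / 2 ^ w)) := by
    have h := Int.mul_ediv_add_emod n (2 ^ w)
    have hpow : (2 : Int) ^ w = 2 ^ k * 2 ^ (w - k) := by
      rw [← pow_add]; congr 1; omega
    rw [hpow] at h ⊢
    linear_combination -h
  conv_rhs => rw [hsplit]
  rw [Int.add_mul_ediv_left _ _ hk0]
  have h2 : (2 : Int) ^ (w - k) * (n / 2 ^ w) = 2 * (2 ^ (w - k - 1) * (n / 2 ^ w)) := by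
    rw [← mul_assoc, ← pow_succ']
    congr 2
    omega
  rw [h2, Int.add_mul_emod_self_left]

-- bits at and above nbits are the sign
theorem high_bit_eq (n : Int) (k : Nat) (hk : PySem.Int.bitLength n + 1 ≤ k) :
    cchar n k = if 0 ≤ n then '0' else '1' := by
  have habs := PySem.Int.lt_two_pow_bitLength n
  have hpow : ((2 : Int) ^ PySem.Int.bitLength n) ≤ 2 ^ k :=
    pow_le_pow_right₀ (by norm_num) (by omega)
  have habs' : ((n.natAbs : Int)) < 2 ^ k := by
    calc ((n.natAbs : Int)) < ((2 ^ PySem.Int.bitLength n : Nat) : Int) := by exact_mod_cast habs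
      _ = (2 : Int) ^ PySem.Int.bitLength n := by push_cast; ring
      _ ≤ 2 ^ k := hpow
  by_cases hn : 0 ≤ n
  · have hlt : n < 2 ^ k := by
      have : ((n.natAbs : Int)) = n := Int.natAbs_of_nonneg hn
      omega
    unfold cchar
    rw [Int.ediv_eq_zero_of_lt hn hlt]
    simp only [Int.zero_emod, Int.toNat_zero, if_pos hn]
    rfl
  · have hgt : -(2 ^ k) < n := by
      have : ((n.natAbs : Int)) = -n := Int.ofNat_natAbs_of_nonpos (by omega)
      omega
    have hk0 : (0 : Int) < 2 ^ k := by positivity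
    have hdiv : n / 2 ^ k = -1 := by
      have hsum : (0 : Int) ≤ 2 ^ k + n := by omega
      have : n = (2 ^ k + n) + 2 ^ k * (-1) := by ring
      rw [this, Int.add_mul_ediv_left _ _ (ne_of_gt hk0),
        Int.ediv_eq_zero_of_lt hsum (by omega)]
      norm_num
    unfold cchar
    rw [hdiv]
    simp only [if_neg hn]
    rfl

-- characterization of A's binary_convertor 20 n
theorem bc_eq (n : Int) : binary_convertor 20 n =
    ((List.range (max 20 (PySem.Int.bitLength n + 1))).reverse).map (cchar n) := by
  set nb : Nat := PySem.Int.bitLength n + 1 with hnb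
  set N : Nat := max 20 nb with hN
  have hnbN : nb ≤ N := le_max_right _ _
  have hnbpos : 0 < nb := by omega
  have hP : (0 : Int) < 2 ^ nb := by positivity
  have hmask : PySem.Int.band n ((1 : Int) <<< nb - 1) = n % 2 ^ nb := by
    rw [Int.shiftLeft_eq, one_mul, band_two_pow_sub_one]
  have hge : (0 : Int) ≤ n % 2 ^ nb := Int.emod_nonneg n (by positivity)
  have hlt : n % 2 ^ nb < 2 ^ nb := Int.emod_lt_of_pos n hP
  set m : Nat := (n % 2 ^ nb).toNat with hm
  have hmc : ((m : Int)) = n % 2 ^ nb := Int.toNat_of_nonneg hge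
  have hmlt : m < 2 ^ nb := by
    have h := hlt
    rw [← hmc] at h
    exact_mod_cast h
  have hbin : padBin nb (PySem.Int.toBinChars (PySem.Int.band n ((1 : Int) <<< nb - 1)))
      = binW nb m := by
    have htb : PySem.Int.toBinChars (PySem.Int.band n ((1 : Int) <<< nb - 1)) = Nat.toDigits 2 m := by
      rw [hmask, ← hmc]
      simp [PySem.Int.toBinChars]
    rw [htb, toDigits_eq_bdigits, padBin_bdigits nb m hnbpos hmlt]
  have hlow : binW nb m = ((List.range nb).reverse).map (cchar n) := by
    rw [binW_eq_map]
    apply List.map_congr_left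
    intro k hk
    have hk' : k < nb := List.mem_range.1 (List.mem_reverse.1 hk)
    have hlb := low_bit_eq n nb k hk'
    rw [← hmc] at hlb
    have h4 : ((m / 2 ^ k % 2 : Nat) : Int) = n / 2 ^ k % 2 := by
      rw [← hlb]
      push_cast
      ring
    unfold cchar
    rw [← h4, Int.toNat_natCast]
  have hsplit : (List.range N).reverse
      = ((List.range (N - nb)).map (fun x => nb + x)).reverse ++ (List.range nb).reverse := by
    have hNs : N = nb + (N - nb) := by omega
    rw [← List.reverse_append, ← List.range_add, ← hNs]
  have hhigh : ∀ c : Char, (∀ k, nb ≤ k → cchar n k = c) →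
      (((List.range (N - nb)).map (fun x => nb + x)).reverse).map (cchar n)
        = List.replicate ((20 - (nb : Int)).toNat) c := by
    intro c hc
    have h5 : ∀ b ∈ (((List.range (N - nb)).map (fun x => nb + x)).reverse).map (cchar n),
        b = c := by
      intro b hb
      simp only [List.mem_map, List.mem_reverse, List.mem_range] at hb
      obtain ⟨k, ⟨x, hx, rfl⟩, rfl⟩ := hb
      exact hc _ (by omega)
    rw [List.eq_replicate_of_mem h5]
    simp only [List.length_map, List.length_reverse, List.length_range]
    congr 1
    omega
  by_cases hn : 0 ≤ n
  · have hc : ∀ k, nb ≤ k → cchar n k = '0' := by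
      intro k hk; rw [high_bit_eq n k (by omega)]; simp [hn]
    simp only [binary_convertor, ← hnb, if_pos hn, hbin]
    rw [hsplit, List.map_append, hhigh '0' hc, hlow]
  · have hc : ∀ k, nb ≤ k → cchar n k = '1' := by
      intro k hk; rw [high_bit_eq n k (by omega)]; simp [hn]
    simp only [binary_convertor, ← hnb, if_neg hn, hbin]
    rw [hsplit, List.map_append, hhigh '1' hc, hlow]

theorem revRange_drop (N j : Nat) (h : j ≤ N) :
    ((List.range N).reverse).drop (N - j) = (List.range j).reverse := by
  have : List.range N = List.range j ++ (List.range (N - j)).map (fun x => j + x) := by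
    rw [← List.range_add]; congr 1; omega
  rw [this, List.reverse_append, List.drop_left']
  simp

-- A's immediate field is the bits of n in jalBitOrder order
theorem fieldA_eq (n : Int) :
    ([PySem.List.pyGetD (binary_convertor 20 n) (-20) ' ']
      ++ PySem.List.slice (binary_convertor 20 n) (some (-11)) (some (-1))
      ++ [PySem.List.pyGetD (binary_convertor 20 n) (-11) ' ']
      ++ PySem.List.slice (binary_convertor 20 n) (some (-20)) (some (-12)))
    = jalBitOrder.map (cchar n) := by
  set N : Nat := max 20 (PySem.Int.bitLength n + 1) with hN
  have h20 : 20 ≤ N := le_max_left _ _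
  have hbc : binary_convertor 20 n = ((List.range N).reverse).map (cchar n) := bc_eq n
  have hlen : (((List.range N).reverse).map (cchar n)).length = N := by simp
  have e1 : PySem.List.pyGetD (binary_convertor 20 n) (-20) ' ' = cchar n 19 := by
    rw [hbc, PySem.List.pyGetD_neg_ofNat _ 20 ' ' (by omega) (by simp; omega)]
    simp only [List.getElem_map, List.getElem_reverse, List.getElem_range,
      List.length_range]
    congr 1
    omega
  have e2 : PySem.List.pyGetD (binary_convertor 20 n) (-11) ' ' = cchar n 10 := by
    rw [hbc, PySem.List.pyGetD_neg_ofNat _ 11 ' ' (by omega) (by simp; omega)]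
    simp only [List.getElem_map, List.getElem_reverse, List.getElem_range,
      List.length_range]
    congr 1
    omega
  have hdropj : ∀ j : Nat, j ≤ N →
      ((((List.range N).reverse).map (cchar n)).drop (N - j))
        = ((List.range j).reverse).map (cchar n) := by
    intro j hj
    rw [← List.map_drop, revRange_drop N j hj]
  have e3 : PySem.List.slice (binary_convertor 20 n) (some (-11)) (some (-1))
      = [10, 9, 8, 7, 6, 5, 4, 3, 2, 1].map (cchar n) := by
    rw [hbc]
    simp only [PySem.List.slice]
    rw [show (List.map (cchar n) (List.range N).reverse).length = N from by simp]
    rw [PySem.List.clampIdx_neg_ofNat N 11 (by omega), PySem.List.clampIdx_neg_one]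
    rw [hdropj 11 (by omega), show N - 1 - (N - 11) = 10 from by omega]
    rw [← List.map_take, show ((List.range 11).reverse).take 10
      = [10, 9, 8, 7, 6, 5, 4, 3, 2, 1] from by decide]
  have e4 : PySem.List.slice (binary_convertor 20 n) (some (-20)) (some (-12))
      = [19, 18, 17, 16, 15, 14, 13, 12].map (cchar n) := by
    rw [hbc]
    simp only [PySem.List.slice]
    rw [show (List.map (cchar n) (List.range N).reverse).length = N from by simp]
    rw [PySem.List.clampIdx_neg_ofNat N 20 (by omega), PySem.List.clampIdx_neg_ofNat N 12 (by omega)]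
    rw [hdropj 20 (by omega), show N - 12 - (N - 20) = 8 from by omega]
    rw [← List.map_take, show ((List.range 20).reverse).take 8
      = [19, 18, 17, 16, 15, 14, 13, 12] from by decide]
  rw [e1, e2, e3, e4]
  simp [jalBitOrder]

-- the Int Horner fold is the cast of the Nat Horner fold
theorem foldl_int_eq_nat (n : Int) : ∀ (ks : List Nat) (a : Nat),
    ks.foldl (fun w k => w * 2 + bBit n k) (a : Int)
      = ((ks.foldl (fun w k => w * 2 + (n / 2 ^ k % 2).toNat) a : Nat) : Int) := by
  intro ks
  induction ks with
  | nil => intro a; rfl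
  | cons k ks ih =>
    intro a
    rw [List.foldl_cons, List.foldl_cons]
    have hb : bBit n k = n / 2 ^ k % 2 := by
      unfold bBit
      rw [PySem.Int.floordiv_eq_ediv_of_pos (by positivity),
        PySem.Int.mod_eq_emod_of_pos (by norm_num)]
    have h0 : 0 ≤ n / 2 ^ k % 2 := Int.emod_nonneg _ (by norm_num)
    have hstep : (a : Int) * 2 + bBit n k = (((a * 2 + (n / 2 ^ k % 2).toNat : Nat)) : Int) := by
      rw [hb]
      push_cast [Int.toNat_of_nonneg h0]
      ring
    rw [hstep, ih]

theorem foldl_horner_lt (g : Nat → Nat) (hg : ∀ k, g k ≤ 1) :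
    ∀ (ks : List Nat) (a : Nat),
      ks.foldl (fun x k => x * 2 + g k) a < (a + 1) * 2 ^ ks.length := by
  intro ks
  induction ks with
  | nil => intro a; simp
  | cons k ks ih =>
    intro a
    have h1 := ih (a * 2 + g k)
    have h2 : (a * 2 + g k + 1) * 2 ^ ks.length ≤ (a + 1) * 2 ^ (ks.length + 1) := by
      have := hg k
      have : a * 2 + g k + 1 ≤ (a + 1) * 2 := by omega
      calc (a * 2 + g k + 1) * 2 ^ ks.length ≤ ((a + 1) * 2) * 2 ^ ks.length :=
            Nat.mul_le_mul_right _ this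
        _ = (a + 1) * 2 ^ (ks.length + 1) := by ring
    simpa [List.foldl] using lt_of_lt_of_le h1 h2

theorem binW_foldl (g : Nat → Nat) (hg : ∀ k, g k ≤ 1) :
    ∀ (ks : List Nat) (w a : Nat),
      binW (w + ks.length) (ks.foldl (fun x k => x * 2 + g k) a)
        = binW w a ++ ks.map (fun k => Nat.digitChar (g k)) := by
  intro ks
  induction ks with
  | nil => intro w a; simp
  | cons k ks ih =>
    intro w a
    have hstep : (a * 2 + g k) / 2 = a ∧ (a * 2 + g k) % 2 = g k := by
      have := hg k; omega
    have h1 := ih (w + 1) (a * 2 + g k)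
    have h2 : w + (k :: ks).length = (w + 1) + ks.length := by simp; omega
    rw [List.foldl_cons, h2, h1, binW, hstep.1, hstep.2]
    simp

theorem binW_split (u : Nat) : ∀ (v m : Nat),
    binW (u + v) m = binW u (m / 2 ^ v) ++ binW v (m % 2 ^ v) := by
  intro v
  induction v with
  | zero => intro m; simp [binW]
  | succ v ih =>
    intro m
    have e1 : m / 2 / 2 ^ v = m / 2 ^ (v + 1) := by
      rw [Nat.div_div_eq_div_mul, pow_succ, Nat.mul_comm]
    have e2 : m / 2 % 2 ^ v = m % 2 ^ (v + 1) / 2 := by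
      rw [pow_succ, Nat.mul_comm, Nat.mod_mul_right_div_self]
    have e3 : m % 2 ^ (v + 1) % 2 = m % 2 := Nat.mod_mod_of_dvd m (by simp [pow_succ])
    have h := ih (m / 2)
    rw [show u + (v + 1) = (u + v) + 1 from by omega, binW, h, e1, e2, binW, e3]
    simp

-- the opcode and register slice of the word, per concrete register number
theorem jal_core (n : Int) (rdN : Nat) (h : rdN < 32) :
    (([] ++ jalBitOrder.map (cchar n)) ++ binW 5 rdN) ++ "1101111".toList
      = padBin 32 (PySem.Int.toBinChars
          ((jalBitOrder.foldl (fun w k => w * 2 + bBit n k) 0 * 32 + (rdN : Int)) * 128 + 111)) := by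
  set g : Nat → Nat := fun k => (n / 2 ^ k % 2).toNat with hg
  have hgle : ∀ k, g k ≤ 1 := by
    intro k
    have h0 : 0 ≤ n / 2 ^ k % 2 := Int.emod_nonneg _ (by norm_num)
    have h2 : n / 2 ^ k % 2 < 2 := Int.emod_lt_of_pos _ (by norm_num)
    simp only [hg]
    omega
  have hfold : jalBitOrder.foldl (fun w k => w * 2 + bBit n k) 0
      = ((jalBitOrder.foldl (fun x k => x * 2 + g k) 0 : Nat) : Int) := by
    exact foldl_int_eq_nat n jalBitOrder 0
  set F : Nat := jalBitOrder.foldl (fun x k => x * 2 + g k) 0 with hF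
  have hFlt : F < 2 ^ 20 := by
    have h0 := foldl_horner_lt g hgle jalBitOrder 0
    rw [show (0 + 1) * 2 ^ jalBitOrder.length = 2 ^ 20 from by norm_num [jalBitOrder]] at h0
    exact h0
  have hword : ((F : Int) * 32 + (rdN : Int)) * 128 + 111
      = (((F * 32 + rdN) * 128 + 111 : Nat) : Int) := by push_cast; ring
  have hWlt : (F * 32 + rdN) * 128 + 111 < 2 ^ 32 := by omega
  rw [hfold, hword]
  have htb : PySem.Int.toBinChars (((F * 32 + rdN) * 128 + 111 : Nat) : Int)
      = Nat.toDigits 2 ((F * 32 + rdN) * 128 + 111) := by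
    rw [PySem.Int.toBinChars, if_neg (by omega), Int.toNat_natCast]
  rw [htb, toDigits_eq_bdigits, padBin_bdigits 32 _ (by omega) hWlt]
  have h1 : ((F * 32 + rdN) * 128 + 111) / 2 ^ 12 = F := by omega
  have h2 : ((F * 32 + rdN) * 128 + 111) % 2 ^ 12 = rdN * 128 + 111 := by omega
  rw [show (32 : Nat) = 20 + 12 from rfl, binW_split, h1, h2]
  have h3 : (rdN * 128 + 111) / 2 ^ 7 = rdN := by omega
  have h4 : (rdN * 128 + 111) % 2 ^ 7 = 111 := by omega
  rw [show (12 : Nat) = 5 + 7 from rfl, binW_split, h3, h4]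
  have h5 : binW 20 F = jalBitOrder.map (fun k => Nat.digitChar (g k)) := by
    have h0 := binW_foldl g hgle jalBitOrder 0 0
    rw [show (0 : Nat) + jalBitOrder.length = 20 from by norm_num [jalBitOrder],
      show binW 0 0 = ([] : List Char) from rfl, List.nil_append] at h0
    exact h0
  rw [h5, show binW 7 111 = "1101111".toList from by decide]
  simp [cchar, hg]

-- ===== VERDICT (by name: the statement is the Claim_ definition above) =====
-- each register entry of A's dict: B's table has it, with the 5-bit string as binW
theorem reg_bridge : ∀ p ∈ registers.items,
    (PySem.Dict.get? regnum p.1).isSome = true ∧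
    0 ≤ (PySem.Dict.get? regnum p.1).getD 0 ∧
    ((PySem.Dict.get? regnum p.1).getD 0).toNat < 32 ∧
    p.2.toList = binW 5 (((PySem.Dict.get? regnum p.1).getD 0).toNat) := by decide

-- ===== VERDICT (by name: the statement is the Claim_ definition above) =====
theorem jal_spec : Claim_equal_jal := by
  unfold Claim_equal_jal
  intro lst _ hpre
  obtain ⟨hlen, hof, hregs⟩ := hpre
  have hget2 : PySem.List.pyGet? lst 2 = some (lst.getD 2 "") := by
    rw [List.getD_eq_getElem _ _ (by omega)]
    exact_mod_cast PySem.List.pyGet?_ofNat lst 2 (by omega)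
  have hget1 : PySem.List.pyGet? lst 1 = some (lst.getD 1 "") := by
    rw [List.getD_eq_getElem _ _ (by omega)]
    exact_mod_cast PySem.List.pyGet?_ofNat lst 1 (by omega)
  obtain ⟨n, hn⟩ := Option.isSome_iff_exists.1 hof
  obtain ⟨reg, hreg⟩ := Option.isSome_iff_exists.1 hregs
  have hmem : (lst.getD 1 "", reg) ∈ registers.items :=
    PySem.Dict.mem_items_of_get?_eq_some registers hreg
  have hbr := reg_bridge _ hmem
  obtain ⟨rd, hrd'⟩ := Option.isSome_iff_exists.1 hbr.1
  have hrd : PySem.Dict.get? regnum (lst.getD 1 "") = some rd := hrd'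
  rw [hrd] at hbr
  simp only [Option.getD_some] at hbr
  unfold Spec_jal
  have hA : jal lst = String.ofList ((([] ++
      ([PySem.List.pyGetD (binary_convertor 20 n) (-20) ' ']
        ++ PySem.List.slice (binary_convertor 20 n) (some (-11)) (some (-1))
        ++ [PySem.List.pyGetD (binary_convertor 20 n) (-11) ' ']
        ++ PySem.List.slice (binary_convertor 20 n) (some (-20)) (some (-12))))
      ++ reg.toList) ++ "1101111".toList) := by
    rw [jal]
    simp only [hget2, hn, hget1, hreg, List.foldl_cons, List.foldl_nil]
  have hB : jal_alt lst = String.ofList (padBin 32 (PySem.Int.toBinChars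
      ((jalBitOrder.foldl (fun w k => w * 2 + bBit n k) 0 * 32 + rd) * 128 + 111))) := by
    rw [jal_alt]
    simp only [hget1, hrd, hget2, hn]
  rw [hA, hB]
  congr 1
  rw [fieldA_eq n, hbr.2.2.2,
    show rd = ((rd.toNat : Nat) : Int) from (Int.toNat_of_nonneg hbr.2.1).symm]
  exact jal_core n rd.toNat hbr.2.2.1
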